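-- pv_equiv track=rewrite | github.com/gimso2x/forgeflow | scripts/validate_skill_contracts.py | extract_block_scalar
-- ===== SOURCE A (Python) =====
-- def extract_block_scalar(frontmatter: str, key: str) -> str | None:
--     lines = frontmatter.splitlines()
--     prefix = f'{key}:'
--     for index, line in enumerate(lines):
--         if line.startswith(prefix):
--             rest = line[len(prefix):].strip()
--             if rest not in {'|', '>'}:
--                 return rest or None
--             block: list[str] = []
--             for next_line in lines[index + 1:]:
--                 if next_line and not next_line.startswith((' ', '\t')):
--                     break
--                 block.append(next_line[2:] if next_line.startswith('  ') else next_line.lstrip())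
--             return '\n'.join(block).strip()
--     return None
-- ===== SOURCE B (Python) =====
-- def extract_block_scalar(frontmatter, key):
--     # Single reverse pass: fold over the lines back-to-front, maintaining for each
--     # suffix the answer found in it and (in reverse order, for O(1) appends) the
--     # dedented block its first lines would form.
--     prefix = key + ':'
--     ans, rblock = None, []
--     for line in reversed(frontmatter.splitlines()):
--         if line.startswith(prefix):
--             rest = line[len(prefix):].strip()
--             if rest in ('|', '>'):
--                 ans = '\n'.join(rblock[::-1]).strip()
--             else:
--                 ans = rest or None
--         if line and not line.startswith((' ', '\t')):
--             rblock = []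
--         else:
--             rblock.append(line[2:] if line.startswith('  ') else line.lstrip())
--     return ans
-- ===== Notes on version B (the rewrite author's own statement) =====
-- stated objective: alternative
-- what changed: Replaces A's forward scan with a nested block-collecting loop by a single reverse fold over the lines carrying a pair accumulator (answer found in the suffix, dedented block the suffix starts with), so the block is built incrementally back-to-front and no inner loop or slicing of the tail exists.
import Mathlib
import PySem

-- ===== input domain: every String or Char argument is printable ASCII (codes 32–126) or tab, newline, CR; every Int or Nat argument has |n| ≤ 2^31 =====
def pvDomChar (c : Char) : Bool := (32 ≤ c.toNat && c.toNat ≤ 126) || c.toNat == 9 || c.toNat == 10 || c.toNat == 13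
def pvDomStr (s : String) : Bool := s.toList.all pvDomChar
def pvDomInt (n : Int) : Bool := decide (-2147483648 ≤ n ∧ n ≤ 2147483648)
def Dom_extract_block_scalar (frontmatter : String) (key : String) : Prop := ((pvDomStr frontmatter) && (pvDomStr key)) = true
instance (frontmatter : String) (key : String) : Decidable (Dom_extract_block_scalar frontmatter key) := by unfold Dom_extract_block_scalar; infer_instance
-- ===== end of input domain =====

-- B replaces A's forward scan with an inner block-collecting loop by ONE reverse fold over the
-- lines with a pair accumulator (answer of the suffix, block of the suffix); alternative, same cost.

-- ===== PORT A =====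
-- inner loop: for next_line in lines[index+1:]: break / block.append(...)
def pvBlockA (block : List (List Char)) : List (List Char) → List (List Char)
  | [] => block
  | l :: rest =>
    if !l.isEmpty && !(PySem.Chars.startswith l [' '] || PySem.Chars.startswith l ['\t']) then block
    else pvBlockA (block ++ [if PySem.Chars.startswith l [' ', ' '] then PySem.Chars.slice l (some 2) none else PySem.Chars.lstrip l]) rest

-- outer loop: for index, line in enumerate(lines); the recursion's tail is exactly lines[index+1:]
def pvLoopA (pfx : List Char) : List (List Char) → Option (List Char)
  | [] => none
  | l :: ls =>
    if PySem.Chars.startswith l pfx then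
      let rest := PySem.Chars.strip (PySem.Chars.slice l (some (pfx.length : Int)) none)
      if rest ≠ ['|'] ∧ rest ≠ ['>'] then (if rest = [] then none else some rest)
      else some (PySem.Chars.strip (PySem.Chars.join ['\n'] (pvBlockA [] ls)))
    else pvLoopA pfx ls

def extract_block_scalar (frontmatter : String) (key : String) : Option String :=
  (pvLoopA (key.toList ++ [':']) (PySem.Chars.splitlines frontmatter.toList)).map String.ofList

-- ===== PORT B =====
-- one step of Source B's loop body (the lines are folded from the back, as 'reversed' iterates);
-- st.2 is rblock (the block lines in reverse); rblock[::-1] is ported as .reverse (exact: PySem.List.slice?_none_none_neg_one)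
def pvStepB (pfx : List Char) (l : List Char) (st : Option (List Char) × List (List Char)) :
    Option (List Char) × List (List Char) :=
  let ans :=
    if PySem.Chars.startswith l pfx then
      let rest := PySem.Chars.strip (PySem.Chars.slice l (some (pfx.length : Int)) none)
      if rest = ['|'] ∨ rest = ['>'] then some (PySem.Chars.strip (PySem.Chars.join ['\n'] st.2.reverse))
      else (if rest = [] then none else some rest)
    else st.1
  let blk :=
    if !l.isEmpty && !(PySem.Chars.startswith l [' '] || PySem.Chars.startswith l ['\t']) then []
    else st.2 ++ [if PySem.Chars.startswith l [' ', ' '] then PySem.Chars.slice l (some 2) none else PySem.Chars.lstrip l]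
  (ans, blk)

def extract_block_scalar_alt (frontmatter : String) (key : String) : Option String :=
  (((PySem.Chars.splitlines frontmatter.toList).foldr (pvStepB (key.toList ++ [':'])) (none, [])).1).map String.ofList

-- ===== PRECONDITION & SPEC =====
def Spec_extract_block_scalar (frontmatter : String) (key : String) (out : Option String) : Prop := out = extract_block_scalar_alt frontmatter key
instance (frontmatter : String) (key : String) (out : Option String) : Decidable (Spec_extract_block_scalar frontmatter key out) := by unfold Spec_extract_block_scalar; infer_instance

-- ===== CLAIM (what is proved, stated in full; the proofs are below) =====
def Claim_equal_extract_block_scalar : Prop := ∀ (frontmatter : String) (key : String), Dom_extract_block_scalar frontmatter key → Spec_extract_block_scalar frontmatter key (extract_block_scalar frontmatter key)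

-- ===== LEMMAS AND PROOFS =====
def pvIsEnd (l : List Char) : Bool :=
  !l.isEmpty && !(PySem.Chars.startswith l [' '] || PySem.Chars.startswith l ['\t'])

def pvDedent (l : List Char) : List Char :=
  if PySem.Chars.startswith l [' ', ' '] then PySem.Chars.slice l (some 2) none else PySem.Chars.lstrip l

theorem pvBlockA_cons (acc : List (List Char)) (l : List Char) (ls : List (List Char)) :
    pvBlockA acc (l :: ls) = if pvIsEnd l = true then acc else pvBlockA (acc ++ [pvDedent l]) ls := by
  simp [pvBlockA, pvIsEnd, pvDedent]

-- A's inner loop collects exactly the dedented lines up to the first end-of-block line.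
theorem pvBlockA_eq (ls : List (List Char)) (acc : List (List Char)) :
    pvBlockA acc ls = acc ++ (ls.take ((ls.findIdx? pvIsEnd).getD ls.length)).map pvDedent := by
  induction ls generalizing acc with
  | nil => simp [pvBlockA]
  | cons l ls ih =>
    rw [pvBlockA_cons, List.findIdx?_cons]
    by_cases h : pvIsEnd l = true
    · simp [h]
    · rw [if_neg h, if_neg h, ih]
      cases ls.findIdx? pvIsEnd <;> simp [List.take_succ_cons]

-- B's fold maintains in its second component exactly that same block of the suffix.
theorem pvStepB_snd (pfx l : List Char) (st : Option (List Char) × List (List Char)) :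
    (pvStepB pfx l st).2 = if pvIsEnd l = true then [] else st.2 ++ [pvDedent l] := by
  simp [pvStepB, pvIsEnd, pvDedent]

theorem pvFoldB_snd (pfx : List Char) (ls : List (List Char)) :
    (ls.foldr (pvStepB pfx) (none, [])).2
      = ((ls.take ((ls.findIdx? pvIsEnd).getD ls.length)).map pvDedent).reverse := by
  induction ls with
  | nil => simp
  | cons l ls ih =>
    rw [List.foldr_cons, pvStepB_snd, List.findIdx?_cons]
    by_cases h : pvIsEnd l = true
    · simp [h]
    · rw [if_neg h, if_neg h, ih]
      cases ls.findIdx? pvIsEnd <;> simp [List.take_succ_cons]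

-- B's fold's first component equals A's outer loop.
theorem pvFoldB_fst (pfx : List Char) (ls : List (List Char)) :
    (ls.foldr (pvStepB pfx) (none, [])).1 = pvLoopA pfx ls := by
  induction ls with
  | nil => simp [pvLoopA]
  | cons l ls ih =>
    rw [List.foldr_cons]
    by_cases h : PySem.Chars.startswith l pfx = true
    · simp only [pvStepB, pvLoopA, h, if_pos]
      rw [pvBlockA_eq ls [], pvFoldB_snd]
      simp only [List.nil_append, List.reverse_reverse]
      split_ifs <;> tauto
    · simp only [pvStepB, pvLoopA, h, Bool.false_eq_true, if_false]
      exact ih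

-- ===== VERDICT (by name: the statement is the Claim_ definition above) =====
theorem extract_block_scalar_spec : Claim_equal_extract_block_scalar := by
  intro fm key _
  unfold Spec_extract_block_scalar extract_block_scalar extract_block_scalar_alt
  rw [pvFoldB_fst]
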